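-- pv_equiv track=rewrite | github.com/polymonster/jsn | jsn.py | change_quotes
-- ===== SOURCE A (Python) =====
-- def is_inside_quotes(str_list, pos):
--     for s in str_list:
--         if pos < s[0]:
--             break
--         if s[0] < pos < s[1]:
--             return s[1]+1
--     return 0
--
-- def find_strings(jsn):
--     quote_types = ["\"", "'"]
--     oq = ""
--     prev_char = ""
--     istart = -1
--     str_list = []
--     for ic in range(0, len(jsn)):
--         c = jsn[ic]
--         if c in quote_types:
--             if oq == "":
--                 oq = c
--                 istart = ic
--             elif oq == c and prev_char != "\\":
--                 oq = ""
--                 str_list.append((istart, ic))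
--         if prev_char == "\\" and c == "\\":
--             prev_char = ""
--         else:
--             prev_char = c
--     return str_list
--
-- def change_quotes(jsn):
--     str_list = find_strings(jsn)
--     conditioned = ""
--     for c in range(0, len(jsn)):
--         char = jsn[c]
--         if char == "\"":
--             if is_inside_quotes(str_list, c):
--                 conditioned += "\\\""
--                 continue
--         if char == "'":
--             if not is_inside_quotes(str_list, c):
--                 conditioned += "\""
--                 continue
--         conditioned += char
--     return conditioned
-- ===== SOURCE B (Python) =====
-- def change_quotes(jsn):
--     # pass 1: find string-literal spans, recording interior positions in a set
--     inside = set()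
--     oq = None
--     start = 0
--     escaped = False
--     for i, c in enumerate(jsn):
--         if c == '"' or c == "'":
--             if oq is None:
--                 oq = c
--                 start = i
--             elif c == oq and not escaped:
--                 inside.update(range(start + 1, i))
--                 oq = None
--         escaped = (c == '\\') and not escaped
--     # pass 2: rewrite each character with an O(1) membership test
--     out = []
--     for i, c in enumerate(jsn):
--         if c == '"' and i in inside:
--             out.append('\\"')
--         elif c == "'" and i not in inside:
--             out.append('"')
--         else:
--             out.append(c)
--     return ''.join(out)
-- ===== Notes on version B (the rewrite author's own statement) =====
-- stated objective: faster
-- what changed: B records the interior positions of the string literals in a hash set during a single state-machine pass and rewrites each character with an O(1) membership test, instead of A's per-character linear rescan of the span list via is_inside_quotes.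
import Mathlib
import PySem

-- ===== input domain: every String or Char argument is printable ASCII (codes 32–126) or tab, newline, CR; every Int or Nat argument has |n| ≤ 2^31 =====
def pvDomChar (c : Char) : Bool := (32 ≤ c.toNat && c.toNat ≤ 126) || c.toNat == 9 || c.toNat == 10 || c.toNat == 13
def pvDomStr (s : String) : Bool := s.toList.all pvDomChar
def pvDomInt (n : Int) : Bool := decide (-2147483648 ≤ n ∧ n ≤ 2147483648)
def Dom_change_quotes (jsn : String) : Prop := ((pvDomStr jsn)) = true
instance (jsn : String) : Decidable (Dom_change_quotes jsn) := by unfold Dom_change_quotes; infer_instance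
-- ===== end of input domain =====

-- B replaces A's per-character rescan of the span list by a set of interior positions built once: asymptotically faster.
-- Strings are modeled as List Char; Python's "" prev_char/oq sentinels are modeled as `none`.

-- ===== PORT A =====
def is_inside_quotes (strList : List (Int × Int)) (pos : Int) : Int :=
  match strList with
  | [] => 0
  | s :: rest =>
      if pos < s.1 then 0                                   -- break → final `return 0`
      else if s.1 < pos ∧ pos < s.2 then s.2 + 1
      else is_inside_quotes rest pos

-- state (oq, prev_char, istart, str_list) of find_strings' loop
def findStep (st : Option Char × Option Char × Int × List (Int × Int)) (ic : Int × Char) :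
    Option Char × Option Char × Int × List (Int × Int) :=
  let (oq, prev, istart, strList) := st
  let c := ic.2
  let (oq, istart, strList) :=
    if c = '"' ∨ c = '\'' then
      if oq = none then (some c, ic.1, strList)
      else if oq = some c ∧ prev ≠ some '\\' then (none, istart, strList ++ [(istart, ic.1)])
      else (oq, istart, strList)
    else (oq, istart, strList)
  let prev := if prev = some '\\' ∧ c = '\\' then none else some c
  (oq, prev, istart, strList)

def find_strings (jsn : String) : List (Int × Int) :=
  ((PySem.List.enumerate jsn.toList 0).foldl findStep (none, none, -1, [])).2.2.2

def change_quotes (jsn : String) : String :=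
  let strList := find_strings jsn
  String.mk ((PySem.List.enumerate jsn.toList 0).foldl (fun conditioned ic =>
    if ic.2 = '"' ∧ is_inside_quotes strList ic.1 ≠ 0 then conditioned ++ ['\\', '"']
    else if ic.2 = '\'' ∧ is_inside_quotes strList ic.1 = 0 then conditioned ++ ['"']
    else conditioned ++ [ic.2]) [])

-- ===== PORT B =====
-- state (inside, oq, start, escaped) of B's first pass
def altScanStep (st : PySem.Set Int × Option Char × Int × Bool) (ic : Int × Char) :
    PySem.Set Int × Option Char × Int × Bool :=
  let (inside, oq, start, escaped) := st
  let (inside, oq, start) :=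
    if ic.2 = '"' ∨ ic.2 = '\'' then
      if oq = none then (inside, some ic.2, ic.1)
      else if oq = some ic.2 ∧ escaped = false then
        (PySem.Set.update inside (PySem.List.pyRange (start + 1) ic.1 1), none, start)
      else (inside, oq, start)
    else (inside, oq, start)
  (inside, oq, start, (ic.2 == '\\') && !escaped)

def change_quotes_alt (jsn : String) : String :=
  let inside := ((PySem.List.enumerate jsn.toList 0).foldl altScanStep ([], none, 0, false)).1
  String.mk (((PySem.List.enumerate jsn.toList 0).foldl (fun out ic =>
    if ic.2 = '"' ∧ PySem.Set.contains inside ic.1 then out ++ [['\\', '"']]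
    else if ic.2 = '\'' ∧ ¬ PySem.Set.contains inside ic.1 then out ++ [['"']]
    else out ++ [[ic.2]]) ([] : List (List Char))).flatten)

-- ===== PRECONDITION & SPEC =====
def Spec_change_quotes (jsn : String) (out : String) : Prop := out = change_quotes_alt jsn
instance (jsn : String) (out : String) : Decidable (Spec_change_quotes jsn out) := by unfold Spec_change_quotes; infer_instance

-- ===== CLAIM (what is proved, stated in full; the proofs are below) =====
def Claim_equal_change_quotes : Prop := ∀ (jsn : String), Dom_change_quotes jsn → Spec_change_quotes jsn (change_quotes jsn)

-- ===== LEMMAS AND PROOFS =====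

-- spans found so far: strictly ordered, strict interiors, all before position n
def SpanInv (n : Int) (spans : List (Int × Int)) : Prop :=
  spans.Pairwise (fun p q => p.2 < q.1) ∧ ∀ p ∈ spans, 0 ≤ p.1 ∧ p.1 < p.2 ∧ p.2 < n

-- coupling of A's find_strings state with B's first-pass state after scanning positions < n
def ScanRel (n : Int) (stA : Option Char × Option Char × Int × List (Int × Int))
    (stB : PySem.Set Int × Option Char × Int × Bool) : Prop :=
  stB.2.1 = stA.1 ∧
  (stB.2.2.2 = true ↔ stA.2.1 = some '\\') ∧
  (stA.1 ≠ none → stB.2.2.1 = stA.2.2.1 ∧ 0 ≤ stA.2.2.1 ∧ stA.2.2.1 < n ∧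
      ∀ p ∈ stA.2.2.2, p.2 < stA.2.2.1) ∧
  SpanInv n stA.2.2.2 ∧
  (∀ x : Int, x ∈ stB.1 ↔ ∃ p ∈ stA.2.2.2, p.1 < x ∧ x < p.2)

lemma spanInv_mono {n m : Int} {spans : List (Int × Int)} (h : SpanInv n spans) (hnm : n ≤ m) :
    SpanInv m spans := by
  refine ⟨h.1, fun p hp => ?_⟩
  have := h.2 p hp
  exact ⟨this.1, this.2.1, by omega⟩

lemma step_rel (n : Int) (hn : 0 ≤ n) (c : Char)
    (oq prev : Option Char) (istart : Int) (spans : List (Int × Int))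
    (ins : PySem.Set Int) (oq' : Option Char) (start : Int) (esc : Bool)
    (h : ScanRel n (oq, prev, istart, spans) (ins, oq', start, esc)) :
    ScanRel (n + 1) (findStep (oq, prev, istart, spans) (n, c))
      (altScanStep (ins, oq', start, esc) (n, c)) := by
  obtain ⟨h1, h2, h3, h4, h5⟩ := h
  simp only at h1 h2 h3 h4 h5
  have hesc : ((c == '\\') && !esc) = true ↔
      (if prev = some '\\' ∧ c = '\\' then none else some c) = some '\\' := by
    by_cases hpv : prev = some '\\' <;> by_cases hc : c = '\\' <;> simp_all
  by_cases hq : c = '"' ∨ c = '\''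
  · by_cases ho : oq = none
    · -- opening quote
      have eA : findStep (oq, prev, istart, spans) (n, c) =
          (some c, if prev = some '\\' ∧ c = '\\' then none else some c, n, spans) := by
        simp [findStep, hq, ho]
      have eB : altScanStep (ins, oq', start, esc) (n, c) =
          (ins, some c, n, (c == '\\') && !esc) := by
        simp [altScanStep, hq, h1, ho]
      rw [eA, eB]
      refine ⟨rfl, hesc, ?_, spanInv_mono h4 (by omega), h5⟩
      intro _
      refine ⟨rfl, hn, by dsimp only; omega, fun p hp => by have := h4.2 p hp; dsimp only; omega⟩
    · have hcl : (oq = some c ∧ prev ≠ some '\\') ↔ (oq' = some c ∧ esc = false) := by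
        constructor
        · rintro ⟨ha, hb⟩
          exact ⟨h1.trans ha, by rcases esc with _ | _ <;> simp_all⟩
        · rintro ⟨ha, hb⟩
          refine ⟨h1.symm.trans ha, fun hpv => ?_⟩
          rw [hb] at h2; simp [hpv] at h2
      by_cases hcls : oq = some c ∧ prev ≠ some '\\'
      · -- closing quote: A appends the span, B marks its interior
        have h3' := h3 (by simp [hcls.1])
        have hB := hcl.mp hcls
        have eA : findStep (oq, prev, istart, spans) (n, c) =
            (none, if prev = some '\\' ∧ c = '\\' then none else some c, istart,
              spans ++ [(istart, n)]) := by
          simp [findStep, hq, hcls.1, hcls.2]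
        have eB : altScanStep (ins, oq', start, esc) (n, c) =
            (PySem.Set.update ins (PySem.List.pyRange (start + 1) n 1), none, start,
              (c == '\\') && !esc) := by
          simp [altScanStep, hq, hB.1, hB.2]
        rw [eA, eB]
        refine ⟨rfl, hesc, by simp, ?_, ?_⟩
        · refine ⟨?_, ?_⟩
          · rw [List.pairwise_append]
            refine ⟨h4.1, by simp, ?_⟩
            intro a ha b hb
            simp only [List.mem_singleton] at hb; subst hb
            exact h3'.2.2.2 a ha
          · intro p hp
            rcases List.mem_append.mp hp with hp | hp
            · have := h4.2 p hp; exact ⟨this.1, this.2.1, by omega⟩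
            · simp only [List.mem_singleton] at hp; subst hp
              exact ⟨h3'.2.1, by simpa using h3'.2.2.1, by omega⟩
        · intro x
          simp only
          rw [PySem.Set.mem_update, h5 x]
          constructor
          · rintro (⟨p, hp, hx⟩ | hx)
            · exact ⟨p, List.mem_append_left _ hp, hx⟩
            · rw [PySem.List.mem_pyRange_one] at hx
              refine ⟨(istart, n), List.mem_append_right _ (by simp), ?_⟩
              have := h3'.1; simp; omega
          · rintro ⟨p, hp, hx⟩
            rcases List.mem_append.mp hp with hp | hp
            · exact Or.inl ⟨p, hp, hx⟩
            · simp only [List.mem_singleton] at hp; subst hp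
              refine Or.inr ?_
              rw [PySem.List.mem_pyRange_one]
              have := h3'.1; simp at hx; omega
      · -- a quote, but neither opening nor closing
        have hncl : ¬ (oq' = some c ∧ esc = false) := fun hh => hcls (hcl.mpr hh)
        have hBo : ¬ oq' = none := by rw [h1]; exact ho
        have eA : findStep (oq, prev, istart, spans) (n, c) =
            (oq, if prev = some '\\' ∧ c = '\\' then none else some c, istart, spans) := by
          simp [findStep, hq, ho, hcls]
        have eB : altScanStep (ins, oq', start, esc) (n, c) =
            (ins, oq', start, (c == '\\') && !esc) := by
          simp [altScanStep, hq, hBo, hncl]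
        rw [eA, eB]
        refine ⟨h1, hesc, ?_, spanInv_mono h4 (by omega), h5⟩
        intro hne
        have h3' := h3 hne
        exact ⟨h3'.1, h3'.2.1, by dsimp only; omega, h3'.2.2.2⟩
  · -- not a quote character
    have eA : findStep (oq, prev, istart, spans) (n, c) =
        (oq, if prev = some '\\' ∧ c = '\\' then none else some c, istart, spans) := by
      simp [findStep, hq]
    have eB : altScanStep (ins, oq', start, esc) (n, c) =
        (ins, oq', start, (c == '\\') && !esc) := by
      simp [altScanStep, hq]
    rw [eA, eB]
    refine ⟨h1, hesc, ?_, spanInv_mono h4 (by omega), h5⟩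
    intro hne
    have h3' := h3 hne
    exact ⟨h3'.1, h3'.2.1, by dsimp only; omega, h3'.2.2.2⟩

lemma fold_rel (cs : List Char) : ∀ (n : Int) (stA : Option Char × Option Char × Int × List (Int × Int))
    (stB : PySem.Set Int × Option Char × Int × Bool), 0 ≤ n → ScanRel n stA stB →
    ScanRel (n + cs.length) ((PySem.List.enumerate cs n).foldl findStep stA)
      ((PySem.List.enumerate cs n).foldl altScanStep stB) := by
  induction cs with
  | nil => intro n stA stB hn h; simpa using h
  | cons c cs ih =>
    intro n stA stB hn h
    rw [PySem.List.enumerate_cons]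
    simp only [List.foldl_cons]
    obtain ⟨oq, prev, istart, spans⟩ := stA
    obtain ⟨ins, oq', start, esc⟩ := stB
    have h' := ih (n + 1) _ _ (by omega) (step_rel n hn c oq prev istart spans ins oq' start esc h)
    have harith : (n + 1) + (cs.length : Int) = n + ((c :: cs).length : Int) := by
      simp; omega
    rwa [harith] at h'

lemma is_inside_iff (spans : List (Int × Int)) (h1 : spans.Pairwise (fun p q => p.2 < q.1))
    (h2 : ∀ p ∈ spans, 0 ≤ p.1 ∧ p.1 < p.2) (x : Int) :
    is_inside_quotes spans x ≠ 0 ↔ ∃ p ∈ spans, p.1 < x ∧ x < p.2 := by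
  induction spans with
  | nil => simp [is_inside_quotes]
  | cons s rest ih =>
    rw [is_inside_quotes]
    split_ifs with hlt hin
    · simp only [ne_eq, not_true_eq_false, false_iff]
      rintro ⟨p, hp, hx⟩
      rcases List.mem_cons.mp hp with rfl | hp
      · omega
      · have hb := (List.pairwise_cons.mp h1).1 p hp
        have ha := h2 s (by simp)
        omega
    · have ha := h2 s (by simp)
      constructor
      · intro _; exact ⟨s, by simp, hin⟩
      · intro _; omega
    · rw [ih (List.pairwise_cons.mp h1).2 (fun p hp => h2 p (List.mem_cons_of_mem _ hp))]
      constructor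
      · rintro ⟨p, hp, hx⟩; exact ⟨p, List.mem_cons_of_mem _ hp, hx⟩
      · rintro ⟨p, hp, hx⟩
        rcases List.mem_cons.mp hp with rfl | hp
        · omega
        · exact ⟨p, hp, hx⟩

lemma rel_init : ScanRel 0 (none, none, -1, []) ([], none, 0, false) := by
  refine ⟨rfl, by simp, by simp, ⟨List.Pairwise.nil, by simp⟩, by simp⟩

-- ===== VERDICT (by name: the statement is the Claim_ definition above) =====
theorem change_quotes_spec : Claim_equal_change_quotes := by
  intro jsn _
  unfold Spec_change_quotes
  have hrel := fold_rel jsn.toList 0 _ _ le_rfl rel_init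
  simp only [zero_add] at hrel
  obtain ⟨_, _, _, ⟨hpw, hbd⟩, hmem⟩ := hrel
  have hiff : ∀ x : Int,
      PySem.Set.contains ((PySem.List.enumerate jsn.toList 0).foldl altScanStep ([], none, 0, false)).1 x = true ↔
      is_inside_quotes (find_strings jsn) x ≠ 0 := by
    intro x
    rw [PySem.Set.contains_iff, hmem x]
    exact (is_inside_iff _ hpw (fun p hp => ⟨(hbd p hp).1, (hbd p hp).2.1⟩) x).symm
  simp only [change_quotes, change_quotes_alt]
  congr 1
  rw [List.foldl_ext _ (fun (acc : List Char) (ic : Int × Char) => acc ++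
        (if ic.2 = '"' ∧ is_inside_quotes (find_strings jsn) ic.1 ≠ 0 then ['\\', '"']
         else if ic.2 = '\'' ∧ is_inside_quotes (find_strings jsn) ic.1 = 0 then ['"']
         else [ic.2])) []
      (by intro a b _; dsimp only; split_ifs <;> rfl),
    List.foldl_ext _ (fun (acc : List (List Char)) (ic : Int × Char) => acc ++
        [(if ic.2 = '"' ∧ is_inside_quotes (find_strings jsn) ic.1 ≠ 0 then ['\\', '"']
          else if ic.2 = '\'' ∧ is_inside_quotes (find_strings jsn) ic.1 = 0 then ['"']
          else [ic.2])]) []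
      (by
        intro a b _
        dsimp only
        have hb := hiff b.1
        by_cases hc : PySem.Set.contains ((PySem.List.enumerate jsn.toList 0).foldl altScanStep ([], none, 0, false)).1 b.1 = true
        · have hin := hb.mp hc
          split_ifs <;> simp_all
        · have hnin : ¬ is_inside_quotes (find_strings jsn) b.1 ≠ 0 := fun hh => hc (hb.mpr hh)
          split_ifs <;> simp_all),
    PySem.List.foldl_append_eq_flatMap, PySem.List.foldl_append_singleton_eq_map]
  simp [List.flatMap_def]
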